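-- pv_equiv track=rewrite | github.com/Soldy/mailsort | src/tools.py | headerSize
-- ===== SOURCE A (Python) =====
-- def headerSize(lines: list[str])->int:
--     header_size = -1
--     for i in range(len(lines)):
--         line = (lines[i].rstrip().lstrip()).split(':')
--         if len(line) > 1:
--             header_size = header_size + 1
--         if 2 > len(line):
--             return header_size
--     return header_size
-- ===== SOURCE B (Python) =====
-- def headerSize(lines: list[str]) -> int:
--     # Divide and conquer: the answer is (index of the first colon-less line,
--     # or len(lines) if none) minus 1.  Find that boundary by binary splitting:
--     # if the left half contains a colon-less line, its boundary is the answer,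
--     # otherwise recurse into the right half.
--     def first_colonless(lo: int, hi: int) -> int:
--         if lo >= hi:
--             return hi
--         if hi - lo == 1:
--             return lo if ':' not in lines[lo] else hi
--         mid = (lo + hi) // 2
--         b = first_colonless(lo, mid)
--         return b if b < mid else first_colonless(mid, hi)
--     return first_colonless(0, len(lines)) - 1
-- ===== Notes on version B (the rewrite author's own statement) =====
-- stated objective: alternative
-- what changed: Replaces A's single-pass counter with early return by a recursive divide-and-conquer that binary-splits the list, locates the first colon-less line's index (len(lines) if none), and returns it minus 1 (dropping the redundant strip, which cannot affect colon membership).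
import Mathlib
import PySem

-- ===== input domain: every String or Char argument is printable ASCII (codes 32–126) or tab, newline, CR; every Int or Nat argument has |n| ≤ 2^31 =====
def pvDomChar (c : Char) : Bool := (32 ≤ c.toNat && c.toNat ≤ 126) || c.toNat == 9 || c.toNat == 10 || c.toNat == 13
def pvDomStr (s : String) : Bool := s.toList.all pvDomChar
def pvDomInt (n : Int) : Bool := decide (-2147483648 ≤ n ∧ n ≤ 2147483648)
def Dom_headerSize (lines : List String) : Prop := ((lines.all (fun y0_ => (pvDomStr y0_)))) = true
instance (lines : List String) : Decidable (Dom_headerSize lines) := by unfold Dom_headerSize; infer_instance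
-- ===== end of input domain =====

-- B replaces A's single-pass counter by a divide-and-conquer search for the first colon-less
-- line's index (it drops the redundant strip, which cannot affect colon membership); objective: alternative.

-- ===== PORT A =====
def headerSizeGo : List String → Int → Int
  | [], headerSize => headerSize
  | l :: rest, headerSize =>
      let line := PySem.Chars.splitOn (PySem.Chars.lstrip (PySem.Chars.rstrip l.toList)) [':']
      let headerSize' := if 1 < line.length then headerSize + 1 else headerSize
      if line.length < 2 then headerSize' else headerSizeGo rest headerSize'

def headerSize (lines : List String) : Int := headerSizeGo lines (-1)

-- ===== PORT B =====
-- first_colonless(lo, hi): binary-split search for the first colon-less line in lines[lo:hi]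
-- (fuel = hi - lo bound, a totality guard only: every call keeps fuel ≥ hi - lo)
def firstColonless (lines : List String) : Nat → Nat → Nat → Nat
  | 0, _, hi => hi
  | fuel + 1, lo, hi =>
    if lo ≥ hi then hi
    else if hi - lo = 1 then (if PySem.Str.isIn ":" (lines.getD lo "") then hi else lo)
    else
      let mid := (lo + hi) / 2
      let b := firstColonless lines fuel lo mid
      if b < mid then b else firstColonless lines fuel mid hi

def headerSize_alt (lines : List String) : Int :=
  (firstColonless lines lines.length 0 lines.length : Int) - 1

-- ===== PRECONDITION & SPEC =====
def Spec_headerSize (lines : List String) (out : Int) : Prop := out = headerSize_alt lines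
instance (lines : List String) (out : Int) : Decidable (Spec_headerSize lines out) := by unfold Spec_headerSize; infer_instance

-- ===== CLAIM (what is proved, stated in full; the proofs are below) =====
def Claim_equal_headerSize : Prop := ∀ (lines : List String), Dom_headerSize lines → Spec_headerSize lines (headerSize lines)

-- ===== LEMMAS AND PROOFS =====

-- bnd xs = index of the first colon-less element of xs (xs.length if none)
def bnd : List String → Nat
  | [] => 0
  | l :: rest => if PySem.Str.isIn ":" l then 1 + bnd rest else 0

-- each piece of splitOn with a single-character separator: length = count + 1
lemma splitOn_go_single_length (c : Char) :
    ∀ (fuel : Nat) (l cur : List Char) (acc : List (List Char)), l.length < fuel →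
      (PySem.Chars.splitOn.go [c] fuel l cur acc).length = acc.length + 1 + l.count c := by
  intro fuel
  induction fuel with
  | zero => intro l cur acc h; omega
  | succ n ih =>
    intro l cur acc h
    match l with
    | [] => simp [PySem.Chars.splitOn.go]
    | a :: rest =>
      simp only [PySem.Chars.splitOn.go]
      by_cases hp : List.isPrefixOf [c] (a :: rest) = true
      · have hac : c = a := by simpa [List.isPrefixOf] using hp
        rw [if_pos hp]
        simp only [List.length_singleton, List.drop_succ_cons, List.drop_zero]
        rw [ih rest [] (cur.reverse :: acc) (by simp at h; omega)]
        simp [hac]; omega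
      · have hac : ¬ a = c := by
          intro hh; exact hp (by simp [List.isPrefixOf, hh])
        rw [if_neg hp]
        rw [ih rest (a :: cur) acc (by simp at h; omega)]
        simp [hac]

lemma length_splitOn_single (l : List Char) (c : Char) :
    (PySem.Chars.splitOn l [c]).length = l.count c + 1 := by
  unfold PySem.Chars.splitOn
  rw [splitOn_go_single_length c (l.length + 1) l [] [] (by omega)]
  simp [Nat.add_comm]

lemma mem_dropWhile_iff {p : Char → Bool} {a : Char} (ha : p a = false) (l : List Char) :
    a ∈ l.dropWhile p ↔ a ∈ l := by
  induction l with
  | nil => simp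
  | cons b l ih =>
    by_cases hb : p b = true
    · rw [List.dropWhile_cons_of_pos hb, ih]
      have : ¬ a = b := fun hh => by rw [hh] at ha; rw [ha] at hb; cases hb
      simp [this]
    · rw [List.dropWhile_cons_of_neg hb]

lemma colon_mem_strip (t : List Char) :
    ':' ∈ PySem.Chars.lstrip (PySem.Chars.rstrip t) ↔ ':' ∈ t := by
  have hsp : PySem.Chars.isspace ':' = false := by decide
  unfold PySem.Chars.lstrip PySem.Chars.rstrip
  rw [mem_dropWhile_iff hsp, List.mem_reverse, mem_dropWhile_iff hsp, List.mem_reverse]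

lemma isIn_singleton_iff (l : List Char) :
    PySem.Chars.isIn [':'] l = true ↔ ':' ∈ l := by
  rw [PySem.Chars.isIn_iff_infix]
  constructor
  · intro h; exact h.mem (by simp)
  · intro h
    rcases List.append_of_mem h with ⟨s, t, rfl⟩
    exact ⟨s, t, by simp⟩

-- per-line agreement of A's split test and B's colon test
lemma line_test (l : String) :
    (1 < (PySem.Chars.splitOn (PySem.Chars.lstrip (PySem.Chars.rstrip l.toList)) [':']).length)
      ↔ PySem.Str.isIn ":" l = true := by
  rw [length_splitOn_single]
  have hIs : PySem.Str.isIn ":" l = PySem.Chars.isIn [':'] l.toList := by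
    simp [PySem.Str.isIn]
  rw [hIs, isIn_singleton_iff, ← colon_mem_strip l.toList]
  constructor
  · intro h
    exact List.count_pos_iff.mp (by omega)
  · intro h
    have := List.count_pos_iff.mpr h
    omega

-- A's loop computes start + bnd
lemma go_eq (lines : List String) : ∀ hs : Int,
    headerSizeGo lines hs = hs + (bnd lines : Int) := by
  induction lines with
  | nil => intro hs; simp [headerSizeGo, bnd]
  | cons l rest ih =>
    intro hs
    simp only [headerSizeGo, bnd]
    by_cases h : PySem.Str.isIn ":" l = true
    · have h1 := (line_test l).mpr h
      rw [if_neg (by omega : ¬ (PySem.Chars.splitOn (PySem.Chars.lstrip (PySem.Chars.rstrip l.toList)) [':']).length < 2),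
          if_pos h1, ih, if_pos h]
      push_cast; ring
    · have h1 : ¬ 1 < (PySem.Chars.splitOn (PySem.Chars.lstrip (PySem.Chars.rstrip l.toList)) [':']).length :=
        fun hh => h ((line_test l).mp hh)
      have hlen := length_splitOn_single (PySem.Chars.lstrip (PySem.Chars.rstrip l.toList)) ':'
      rw [if_pos (by omega : (PySem.Chars.splitOn (PySem.Chars.lstrip (PySem.Chars.rstrip l.toList)) [':']).length < 2),
          if_neg h1, if_neg h]
      simp

lemma bnd_le (xs : List String) : bnd xs ≤ xs.length := by
  induction xs with
  | nil => simp [bnd]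
  | cons l rest ih =>
    simp only [bnd, List.length_cons]
    split_ifs <;> omega

-- divide-and-conquer law for bnd
lemma bnd_append (xs ys : List String) :
    bnd (xs ++ ys) = if bnd xs < xs.length then bnd xs else xs.length + bnd ys := by
  induction xs with
  | nil => simp [bnd]
  | cons l rest ih =>
    simp only [List.cons_append, bnd, List.length_cons]
    by_cases h : PySem.Str.isIn ":" l = true
    · rw [if_pos h, if_pos h, ih]
      have := bnd_le rest
      split_ifs <;> omega
    · rw [if_neg h, if_neg h, if_pos (by omega)]

-- B's binary search computes lo + bnd of the segment lines[lo:hi]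
lemma firstColonless_eq (lines : List String) :
    ∀ (k lo hi : Nat), hi - lo ≤ k → lo ≤ hi → hi ≤ lines.length →
      firstColonless lines k lo hi = lo + bnd ((lines.drop lo).take (hi - lo)) := by
  intro k
  induction k with
  | zero =>
    intro lo hi hk hlh hh
    have : lo = hi := by omega
    subst this
    simp [firstColonless, bnd]
  | succ n ih =>
    intro lo hi hk hlh hh
    rw [firstColonless]
    by_cases h0 : lo ≥ hi
    · have : lo = hi := by omega
      subst this; simp [bnd]
    · rw [if_neg h0]
      have hlo : lo < lines.length := by omega
      by_cases h1 : hi - lo = 1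
      · rw [if_pos h1, h1]
        have hseg : (lines.drop lo).take 1 = [lines[lo]] := by
          rw [List.drop_eq_getElem_cons hlo, List.take_succ_cons, List.take_zero]
        have hgetD : lines.getD lo "" = lines[lo] := by
          simp [List.getD_eq_getElem?_getD, List.getElem?_eq_getElem hlo]
        rw [hseg, hgetD]
        simp only [bnd]
        split_ifs <;> omega
      · rw [if_neg h1]
        simp only []
        set mid := (lo + hi) / 2 with hmid
        have hm1 : lo < mid := by omega
        have hm2 : mid < hi := by omega
        have hsplit : (lines.drop lo).take (hi - lo)
            = (lines.drop lo).take (mid - lo) ++ (lines.drop mid).take (hi - mid) := by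
          have : hi - lo = (mid - lo) + (hi - mid) := by omega
          rw [this, List.take_add, List.drop_drop]
          have h2 : lo + (mid - lo) = mid := by omega
          rw [h2]
        have hA := ih lo mid (by omega) (by omega) (by omega)
        have hB := ih mid hi (by omega) (by omega) hh
        have hAlen : ((lines.drop lo).take (mid - lo)).length = mid - lo := by
          rw [List.length_take, List.length_drop]; omega
        rw [hA, hB, hsplit, bnd_append, hAlen]
        by_cases hb : bnd ((lines.drop lo).take (mid - lo)) < mid - lo
        · rw [if_pos (by omega), if_pos hb]
        · rw [if_neg (by omega), if_neg hb]
          omega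

-- ===== VERDICT (by name: the statement is the Claim_ definition above) =====
theorem headerSize_spec : Claim_equal_headerSize := by
  intro lines _
  unfold Spec_headerSize headerSize headerSize_alt
  rw [go_eq, firstColonless_eq lines lines.length 0 lines.length (by omega) (by omega) (le_refl _)]
  simp
  ring
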